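-- pv_equiv track=rewrite | github.com/theri6v/CodeSprintSolutions | GeekForGeek/Problem Of The Day/Check if frequencies can be equal.py | sameFreq
-- ===== SOURCE A (Python) =====
-- def sameFreq(s):
--     frequency=[0]*26
--     for char in s:
--         frequency[ord(char)-ord("a")]+=1
--     max_val,min_val,max_count,total=0,float("inf"),0,0
--     for freq in frequency:
--         if freq>0:
--             total+=1
--             if freq>max_val:
--                 max_val=freq
--                 max_count=1
--             elif freq==max_val:
--                 max_count+=1
--             if freq<min_val:
--                 min_val=freq
--     if max_count==total:
--         return True
--     if max_count==total-1 and min_val==1: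
--         return True
--     if max_count==1 and max_val==min_val+1:
--         return True
--     return False
-- ===== SOURCE B (Python) =====
-- def sameFreq(s):
--     frequency = [0] * 26
--     for char in s:
--         frequency[ord(char) - ord("a")] += 1
--     # distinct positive frequency values, in first-occurrence order
--     vals = []
--     for f in frequency:
--         if f > 0 and f not in vals:
--             vals.append(f)
--     if len(vals) <= 1:
--         return True
--     if len(vals) != 2:
--         return False
--     lo, hi = min(vals), max(vals)
--     return (lo == 1 and frequency.count(lo) == 1) or (hi == lo + 1 and frequency.count(hi) == 1)
-- ===== Notes on version B (the rewrite author's own statement) =====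
-- stated objective: simpler
-- what changed: B keeps A's frequency array but replaces the max/min/max-count/total tracking loop and its three-way arithmetic test by collecting the distinct positive frequency values and deciding directly from how many distinct values there are and the counts of the extremes.
import Mathlib
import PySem

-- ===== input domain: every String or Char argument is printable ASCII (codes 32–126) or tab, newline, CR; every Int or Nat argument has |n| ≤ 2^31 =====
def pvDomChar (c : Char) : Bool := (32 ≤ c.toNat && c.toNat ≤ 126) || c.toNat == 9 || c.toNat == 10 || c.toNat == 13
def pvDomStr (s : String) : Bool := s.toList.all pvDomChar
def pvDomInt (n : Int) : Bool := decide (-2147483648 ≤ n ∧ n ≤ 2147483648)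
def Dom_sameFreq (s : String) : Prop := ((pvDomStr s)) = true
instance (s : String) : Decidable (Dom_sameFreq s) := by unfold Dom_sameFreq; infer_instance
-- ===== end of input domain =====

-- B replaces A's max/min/max-count/total tracking loop by collecting the distinct positive
-- frequency values and deciding from how many there are and the counts of the extremes (objective: simpler).

-- ===== PORT A =====
-- the body of A's second loop for a positive freq (total += 1; max/max_count update; min update)
def pvCoreA (st : Int × Option Int × Int × Int) (freq : Int) : Int × Option Int × Int × Int :=
  match st with
  | (mx, mn, mc, tot) =>
    let tot' := tot + 1
    let p := if freq > mx then (freq, (1 : Int)) else if freq = mx then (mx, mc + 1) else (mx, mc)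
    -- min_val starts as float("inf"): `none` here; any freq compares below it
    let mn' : Option Int := match mn with
      | none => some freq
      | some m => if freq < m then some freq else some m
    (p.1, mn', p.2, tot')

def pvStepA (st : Int × Option Int × Int × Int) (freq : Int) : Int × Option Int × Int × Int :=
  if freq > 0 then pvCoreA st freq else st

-- frequency=[0]*26; for char in s: frequency[ord(char)-ord("a")]+=1   (exact where Python
-- does not raise; this first loop is textually identical in A and in B, so both ports share it)
def pvFreq (s : String) : List Int :=
  s.toList.foldl
    (fun freq char =>
      let i : Int := (char.toNat : Int) - 97
      PySem.List.pySetD freq i (PySem.List.pyGetD freq i 0 + 1))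
    (List.replicate 26 (0 : Int))

def sameFreq (s : String) : Bool :=
  let frequency := pvFreq s
  match frequency.foldl pvStepA ((0 : Int), (none : Option Int), (0 : Int), (0 : Int)) with
  | (mx, mn, mc, tot) =>
    if mc = tot then true
    else if mc = tot - 1 ∧ mn = some 1 then true
    -- max_val == min_val + 1: False while min_val is still float("inf") (mn = none)
    else if mc = 1 ∧ mn.map (· + 1) = some mx then true
    else false

-- ===== PORT B =====
-- for f in frequency: if f > 0 and f not in vals: vals.append(f)
def pvStepB (vs : List Int) (f : Int) : List Int :=
  if f > 0 && !(vs.contains f) then vs ++ [f] else vs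

def sameFreq_alt (s : String) : Bool :=
  let frequency := pvFreq s
  let vals := frequency.foldl pvStepB ([] : List Int)
  if vals.length ≤ 1 then true
  else if vals.length ≠ 2 then false
  else
    -- min(vals) / max(vals); vals has length 2 here, so the defaults are never used
    let lo := (PySem.List.min? vals (fun x => x)).getD 0
    let hi := (PySem.List.max? vals (fun x => x)).getD 0
    (lo == 1 && PySem.List.count frequency lo == 1) ||
      (hi == lo + 1 && PySem.List.count frequency hi == 1)

-- ===== PRECONDITION & SPEC =====
-- A raises IndexError on any character with code > 122 ('{' …) or < 71 (index below -26);
-- Pre_ admits exactly the strings on which A returns (all characters 'G'..'z').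
def Pre_sameFreq (s : String) : Prop := (s.toList.all (fun c => 71 ≤ c.toNat && c.toNat ≤ 122)) = true
instance (s : String) : Decidable (Pre_sameFreq s) := by unfold Pre_sameFreq; infer_instance

def pvWitness_sameFreq : String := "ab"

def Spec_sameFreq (s : String) (out : Bool) : Prop := out = sameFreq_alt s
instance (s : String) (out : Bool) : Decidable (Spec_sameFreq s out) := by unfold Spec_sameFreq; infer_instance

-- ===== CLAIM (what is proved, stated in full; the proofs are below) =====
def Claim_equal_sameFreq : Prop := ∀ (s : String), Dom_sameFreq s → Pre_sameFreq s → Spec_sameFreq s (sameFreq s)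

-- ===== LEMMAS AND PROOFS =====

-- sum of counts of two resp. three pairwise distinct values bounds/computes the length
theorem pvCountTwo (P : List Int) (a b : Int) (hab : a ≠ b)
    (hall : ∀ p ∈ P, p = a ∨ p = b) : P.length = P.count a + P.count b := by
  induction P with
  | nil => simp
  | cons x xs ih =>
    have hx := hall x (by simp)
    have ih' := ih (fun p hp => hall p (by simp [hp]))
    simp only [List.count_cons, List.length_cons, ih']
    rcases hx with rfl | rfl
    · simp [hab]; omega
    · simp [Ne.symm hab]; omega

theorem pvCountThree (P : List Int) (a b c : Int) (hab : a ≠ b) (hac : a ≠ c) (hbc : b ≠ c) :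
    P.count a + P.count b + P.count c ≤ P.length := by
  induction P with
  | nil => simp
  | cons x xs ih =>
    simp only [List.count_cons, List.length_cons]
    by_cases h1 : x = a <;> by_cases h2 : x = b <;> by_cases h3 : x = c <;>
      simp_all <;> omega

-- characterisation of A's second loop
theorem pvAInv (fr : List Int) :
    ∃ M mn c t, fr.foldl pvStepA ((0:Int), none, (0:Int), (0:Int)) = (M, mn, c, t) ∧
      (∀ P, P = fr.filter (fun f => f > 0) →
        t = (P.length : Int) ∧ c = (P.count M : Int) ∧ (∀ p ∈ P, p ≤ M) ∧
        (P = [] → M = 0 ∧ mn = none) ∧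
        (P ≠ [] → M ∈ P ∧ ∃ m, mn = some m ∧ m ∈ P ∧ ∀ p ∈ P, m ≤ p)) := by
  induction fr using List.reverseRecOn with
  | nil =>
    refine ⟨0, none, 0, 0, rfl, ?_⟩
    rintro P rfl; simp
  | append_singleton xs x ih =>
    obtain ⟨M, mn, c, t, heq, hP⟩ := ih
    obtain ⟨ht, hc, hle, hnil, hne⟩ := hP _ rfl
    rw [List.foldl_append, List.foldl_cons, List.foldl_nil, heq]
    by_cases hx : x > 0
    · have hfil : (xs ++ [x]).filter (fun f => f > 0) =
          xs.filter (fun f => f > 0) ++ [x] := by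
        simp [List.filter_append, hx]
      rcases lt_trichotomy M x with hgt | hMx | hlt
      · -- new maximum
        have hcount0 : (xs.filter (fun f => f > 0)).count x = 0 :=
          List.count_eq_zero.mpr (fun h => absurd (hle x h) (by omega))
        have hcommon : ∀ mn' : Option Int,
            (∃ m, mn' = some m ∧ m ∈ xs.filter (fun f => f > 0) ++ [x] ∧
              ∀ p ∈ xs.filter (fun f => f > 0) ++ [x], m ≤ p) →
            (∀ P, P = (xs ++ [x]).filter (fun f => f > 0) →
              (t + 1 : Int) = (P.length : Int) ∧ (1 : Int) = (P.count x : Int) ∧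
              (∀ p ∈ P, p ≤ x) ∧ (P = [] → x = 0 ∧ mn' = none) ∧
              (P ≠ [] → x ∈ P ∧ ∃ m, mn' = some m ∧ m ∈ P ∧ ∀ p ∈ P, m ≤ p)) := by
          intro mn' hmn' P hPe
          subst hPe
          rw [hfil]
          refine ⟨by rw [ht]; simp, ?_, ?_, by simp, fun _ => ⟨by simp, hmn'⟩⟩
          · rw [List.count_append, hcount0]; simp
          · intro p hp
            rcases List.mem_append.mp hp with h | h
            · exact le_of_lt (lt_of_le_of_lt (hle p h) hgt)
            · simp at h; omega
        rcases hmn : mn with _ | m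
        · have hP0 : xs.filter (fun f => f > 0) = [] := by
            by_contra hne'
            obtain ⟨_, m, hm, _⟩ := hne hne'
            rw [hmn] at hm; simp at hm
          refine ⟨x, some x, 1, t + 1, by simp [pvStepA, pvCoreA, hx, hgt], ?_⟩
          refine hcommon _ ⟨x, rfl, by simp, ?_⟩
          intro p hp
          rcases List.mem_append.mp hp with h | h
          · rw [hP0] at h; simp at h
          · simp at h; omega
        · have hne' : xs.filter (fun f => f > 0) ≠ [] := by
            intro h0; have := (hnil h0).2; rw [hmn] at this; simp at this
          obtain ⟨_, m', hm', hmem', hmin'⟩ := hne hne'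
          rw [hmn] at hm'; injection hm' with hm'; subst hm'
          refine ⟨x, (if x < m then some x else some m), 1, t + 1,
            by simp [pvStepA, pvCoreA, hx, hgt], ?_⟩
          by_cases hxm : x < m
          · refine hcommon _ ⟨x, by simp [hxm], by simp, ?_⟩
            intro p hp
            rcases List.mem_append.mp hp with h | h
            · exact le_trans (le_of_lt hxm) (hmin' p h)
            · simp at h; omega
          · refine hcommon _ ⟨m, by simp [hxm], by simp [hmem'], ?_⟩
            intro p hp
            rcases List.mem_append.mp hp with h | h
            · exact hmin' p h
            · simp at h; omega
      · -- equal to the maximum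
        subst hMx
        have hne' : xs.filter (fun f => f > 0) ≠ [] := by
          intro h0; have := (hnil h0).1; omega
        obtain ⟨hMmem, m, hm, hmmem, hmin⟩ := hne hne'
        have hmM : m ≤ M := hmin M hMmem
        refine ⟨M, some m, c + 1, t + 1, ?_, ?_⟩
        · simp only [pvStepA, pvCoreA, hx]
          rw [hm]
          simp [not_lt.mpr hmM]
        · rintro P rfl
          rw [hfil]
          refine ⟨by rw [ht]; simp, ?_, ?_, by simp, ?_⟩
          · rw [List.count_append, hc]; simp
          · intro p hp
            rcases List.mem_append.mp hp with h | h
            · exact hle p h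
            · simp at h; omega
          · intro _
            refine ⟨List.mem_append.mpr (Or.inl hMmem), m, rfl, List.mem_append.mpr (Or.inl hmmem), ?_⟩
            intro p hp
            rcases List.mem_append.mp hp with h | h
            · exact hmin p h
            · simp at h; omega
      · -- below the maximum
        have hne' : xs.filter (fun f => f > 0) ≠ [] := by
          intro h0; have := (hnil h0).1; omega
        obtain ⟨hMmem, m, hm, hmmem, hmin⟩ := hne hne'
        have hcx : (xs.filter (fun f => f > 0)).count M =
            (xs.filter (fun f => f > 0) ++ [x]).count M := by
          rw [List.count_append]
          simp [Ne.symm (ne_of_gt hlt)]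
        refine ⟨M, (if x < m then some x else some m), c, t + 1, ?_, ?_⟩
        · simp only [pvStepA, pvCoreA, hx]
          rw [hm]
          simp [not_lt.mpr (le_of_lt hlt), ne_of_lt hlt]
        · rintro P rfl
          rw [hfil]
          refine ⟨by rw [ht]; simp, ?_, ?_, by simp, ?_⟩
          · rw [hc, hcx]
          · intro p hp
            rcases List.mem_append.mp hp with h | h
            · exact hle p h
            · simp at h; omega
          · intro _
            refine ⟨List.mem_append.mpr (Or.inl hMmem), ?_⟩
            by_cases hxm : x < m
            · refine ⟨x, by simp [hxm], by simp, ?_⟩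
              intro p hp
              rcases List.mem_append.mp hp with h | h
              · exact le_trans (le_of_lt hxm) (hmin p h)
              · simp at h; omega
            · refine ⟨m, by simp [hxm], List.mem_append.mpr (Or.inl hmmem), ?_⟩
              intro p hp
              rcases List.mem_append.mp hp with h | h
              · exact hmin p h
              · simp at h; omega
    · -- non-positive entry: state and filter unchanged
      have hfil : (xs ++ [x]).filter (fun f => f > 0) = xs.filter (fun f => f > 0) := by
        simp [List.filter_append, hx]
      refine ⟨M, mn, c, t, by simp [pvStepA, hx], ?_⟩
      rintro P rfl
      rw [hfil]
      exact ⟨ht, hc, hle, hnil, hne⟩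

-- characterisation of B's vals loop
theorem pvValsInv (fr : List Int) :
    (fr.foldl pvStepB []).Nodup ∧
      (∀ x, x ∈ fr.foldl pvStepB [] ↔ x ∈ fr.filter (fun f => f > 0)) := by
  induction fr using List.reverseRecOn with
  | nil => simp
  | append_singleton xs x ih =>
    obtain ⟨hnd, hmem⟩ := ih
    rw [List.foldl_append, List.filter_append]
    simp only [List.foldl_cons, List.foldl_nil]
    by_cases hx : x > 0
    · by_cases hc : (xs.foldl pvStepB []).contains x
      · have hxin : x ∈ xs.foldl pvStepB [] := by
          simpa [List.contains_iff_mem] using hc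
        have hstep : pvStepB (xs.foldl pvStepB []) x = xs.foldl pvStepB [] := by
          simp only [pvStepB]
          simp [hxin]
        rw [hstep]
        refine ⟨hnd, fun y => ?_⟩
        rw [hmem y]
        constructor
        · intro h; simp [List.mem_append, h]
        · intro h
          rcases (List.mem_append.mp h) with h | h
          · exact h
          · have : y = x := by simpa [hx] using h
            subst this; exact (hmem y).mp hxin
      · have hxnin : x ∉ xs.foldl pvStepB [] := by
          simpa [List.contains_iff_mem] using hc
        have hstep : pvStepB (xs.foldl pvStepB []) x = xs.foldl pvStepB [] ++ [x] := by
          simp only [pvStepB]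
          simp [hx, hxnin]
        rw [hstep]
        constructor
        · exact List.Nodup.append hnd (List.nodup_singleton x)
            (by simpa [List.disjoint_singleton] using hxnin)
        · intro y
          simp only [List.mem_append, hmem y, List.mem_singleton]
          constructor
          · rintro (h | rfl)
            · exact Or.inl h
            · exact Or.inr (by simp [hx])
          · rintro (h | h)
            · exact Or.inl h
            · exact Or.inr (by simpa [hx] using h)
    · have hstep : pvStepB (xs.foldl pvStepB []) x = xs.foldl pvStepB [] := by
        simp [pvStepB, hx]
      rw [hstep]
      refine ⟨hnd, fun y => ?_⟩
      rw [hmem y]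
      simp [hx]

-- the two second halves agree on ANY frequency list
theorem pvMain (fr : List Int) :
    (match fr.foldl pvStepA ((0:Int), (none : Option Int), (0:Int), (0:Int)) with
      | (mx, mn, mc, tot) =>
        if mc = tot then true
        else if mc = tot - 1 ∧ mn = some 1 then true
        else if mc = 1 ∧ mn.map (· + 1) = some mx then true
        else false) =
    (let vals := fr.foldl pvStepB ([] : List Int)
     if vals.length ≤ 1 then true
     else if vals.length ≠ 2 then false
     else
       let lo := (PySem.List.min? vals (fun x => x)).getD 0
       let hi := (PySem.List.max? vals (fun x => x)).getD 0
       (lo == 1 && PySem.List.count fr lo == 1) ||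
         (hi == lo + 1 && PySem.List.count fr hi == 1)) := by
  obtain ⟨M, mn, c, t, heq, hP⟩ := pvAInv fr
  obtain ⟨ht, hc, hle, hnil, hne⟩ := hP _ rfl
  obtain ⟨hnd, hmem⟩ := pvValsInv fr
  rw [heq]
  by_cases h1 : (fr.foldl pvStepB []).length ≤ 1
  · -- at most one distinct positive value: both sides are true
    have hct : c = t := by
      rcases hv : fr.foldl pvStepB [] with _ | ⟨v, tl⟩
      · have hP0 : fr.filter (fun f => f > 0) = [] := by
          apply List.eq_nil_iff_forall_not_mem.mpr
          intro x hx
          have := (hmem x).mpr hx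
          rw [hv] at this; simp at this
        rw [ht, hc, hP0]; simp
      · have htl : tl = [] := by
          rw [hv] at h1; simpa using h1
        subst htl
        have hall : ∀ p ∈ fr.filter (fun f => f > 0), p = v := by
          intro p hp
          have := (hmem p).mpr hp
          rw [hv] at this; simpa using this
        have hvP : v ∈ fr.filter (fun f => f > 0) := (hmem v).mp (by rw [hv]; simp)
        have hMv : M = v := hall M ((hne (by intro h0; rw [h0] at hvP; simp at hvP)).1)
        rw [ht, hc, hMv, List.count_eq_length.mpr (fun b hb => (hall b hb).symm)]
    simp [hct, h1]
  · by_cases h2 : (fr.foldl pvStepB []).length = 2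
    · obtain ⟨a, b, hv⟩ := List.length_eq_two.mp h2
      have hab : a ≠ b := by
        rw [hv] at hnd; simpa using List.pairwise_cons.mp hnd |>.1 b (by simp)
      have hmemv : ∀ x, x ∈ fr.foldl pvStepB [] ↔ x = a ∨ x = b := by
        intro x; rw [hv]; simp
      have haP : a ∈ fr.filter (fun f => f > 0) := (hmem a).mp ((hmemv a).mpr (Or.inl rfl))
      have hbP : b ∈ fr.filter (fun f => f > 0) := (hmem b).mp ((hmemv b).mpr (Or.inr rfl))
      have hPne : fr.filter (fun f => f > 0) ≠ [] := by
        intro h0; rw [h0] at haP; simp at haP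
      obtain ⟨hMP, m, hm, hmP, hmin⟩ := hne hPne
      have hall : ∀ p ∈ fr.filter (fun f => f > 0), p = a ∨ p = b := by
        intro p hp; exact (hmemv p).mp ((hmem p).mpr hp)
      -- identify lo and hi
      have hlo : (PySem.List.min? (fr.foldl pvStepB []) (fun x => x)).getD 0 = min a b := by
        rw [hv, PySem.List.min?_id_cons]; simp
      have hhi : (PySem.List.max? (fr.foldl pvStepB []) (fun x => x)).getD 0 = max a b := by
        rw [hv, PySem.List.max?_id_cons]; simp
      have hmab : m = a ∨ m = b := hall m hmP
      have hMab : M = a ∨ M = b := hall M hMP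
      have hma : m ≤ a := hmin a haP
      have hmb : m ≤ b := hmin b hbP
      have hMa : a ≤ M := hle a haP
      have hMb : b ≤ M := hle b hbP
      have hm_lo : m = min a b := by omega
      have hM_hi : M = max a b := by omega
      have hlt : min a b < max a b := by omega
      have hpos : (0 : Int) < min a b := by
        rcases min_choice a b with h | h <;> rw [h]
        · simpa using (List.mem_filter.mp haP).2
        · simpa using (List.mem_filter.mp hbP).2
      have hlen : (fr.filter (fun f => f > 0)).length =
          (fr.filter (fun f => f > 0)).count (min a b) +
            (fr.filter (fun f => f > 0)).count (max a b) := by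
        rcases le_total a b with h | h
        · rw [min_eq_left h, max_eq_right h]; exact pvCountTwo _ a b hab hall
        · rw [min_eq_right h, max_eq_left h]
          rw [pvCountTwo _ a b hab hall]; omega
      have hloP : min a b ∈ fr.filter (fun f => f > 0) := by
        rcases min_choice a b with h | h <;> rw [h] <;> assumption
      have hhiP : max a b ∈ fr.filter (fun f => f > 0) := by
        rcases max_choice a b with h | h <;> rw [h] <;> assumption
      have hclo : 1 ≤ (fr.filter (fun f => f > 0)).count (min a b) :=
        List.count_pos_iff.mpr hloP
      have hchi : 1 ≤ (fr.filter (fun f => f > 0)).count (max a b) :=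
        List.count_pos_iff.mpr hhiP
      have hcntlo : PySem.List.count fr (min a b) =
          (fr.filter (fun f => f > 0)).count (min a b) := by
        simp [pysem, List.count_filter, hpos]
      have hcnthi : PySem.List.count fr (max a b) =
          (fr.filter (fun f => f > 0)).count (max a b) := by
        have : (0 : Int) < max a b := by omega
        simp [pysem, List.count_filter, this]
      subst hm hm_lo hM_hi
      show (if c = t then true
        else if c = t - 1 ∧ some (min a b) = some 1 then true
        else if c = 1 ∧ Option.map (fun x => x + 1) (some (min a b)) = some (max a b) then true
        else false) = _
      have h2' : ¬((List.foldl pvStepB [] fr).length ≠ 2) := by simp [h2]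
      simp only [if_neg h1, if_neg h2', hlo, hhi, hcntlo, hcnthi, Option.map_some]
      rw [hc, ht, hlen]
      split_ifs with hc1 hc2 hc3
      · exfalso; push_cast at hc1; omega
      · obtain ⟨hc2a, hc2b⟩ := hc2
        have hlo1 : min a b = 1 := by injection hc2b
        have hclo1 : (fr.filter (fun f => f > 0)).count (min a b) = 1 := by
          push_cast at hc2a; omega
        symm; rw [Bool.or_eq_true]; left
        rw [Bool.and_eq_true, beq_iff_eq, beq_iff_eq]
        exact ⟨hlo1, hclo1⟩
      · obtain ⟨hc3a, hc3b⟩ := hc3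
        have hchi1 : (fr.filter (fun f => f > 0)).count (max a b) = 1 := by
          omega
        have hhi1 : max a b = min a b + 1 := by injection hc3b with h'; omega
        symm; rw [Bool.or_eq_true]; right
        rw [Bool.and_eq_true, beq_iff_eq, beq_iff_eq]
        exact ⟨hhi1, hchi1⟩
      · symm
        simp only [Bool.or_eq_false_iff, Bool.and_eq_false_iff, beq_eq_false_iff_ne, ne_eq]
        constructor
        · by_cases hA : min a b = 1
          · right
            intro hclo1
            exact hc2 ⟨by push_cast; omega, by rw [hA]⟩
          · exact Or.inl hA
        · by_cases hB : max a b = min a b + 1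
          · right
            intro hchi1
            exact hc3 ⟨by omega, by rw [hB]⟩
          · exact Or.inl hB
    · -- three or more distinct positive values: both sides are false
      rcases hvv : fr.foldl pvStepB [] with _ | ⟨a, _ | ⟨b, _ | ⟨e, rest⟩⟩⟩
      · rw [hvv] at h1; simp at h1
      · rw [hvv] at h1; simp at h1
      · rw [hvv] at h2; simp at h2
      · have hamem : a ∈ fr.foldl pvStepB [] := by rw [hvv]; simp
        have hbmem : b ∈ fr.foldl pvStepB [] := by rw [hvv]; simp
        have hemem : e ∈ fr.foldl pvStepB [] := by rw [hvv]; simp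
        rw [hvv] at hnd
        have hab : a ≠ b := (List.pairwise_cons.mp hnd).1 b (by simp)
        have hae : a ≠ e := (List.pairwise_cons.mp hnd).1 e (by simp)
        have hbe : b ≠ e :=
          (List.pairwise_cons.mp (List.pairwise_cons.mp hnd).2).1 e (by simp)
        have haP : a ∈ fr.filter (fun f => f > 0) := (hmem a).mp hamem
        have hbP : b ∈ fr.filter (fun f => f > 0) := (hmem b).mp hbmem
        have heP : e ∈ fr.filter (fun f => f > 0) := (hmem e).mp hemem
        have hPne : fr.filter (fun f => f > 0) ≠ [] := by
          intro h0; rw [h0] at haP; simp at haP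
        obtain ⟨hMP, m, hm, hmP, hmin⟩ := hne hPne
        have hca : 1 ≤ (fr.filter (fun f => f > 0)).count a := List.count_pos_iff.mpr haP
        have hcb : 1 ≤ (fr.filter (fun f => f > 0)).count b := List.count_pos_iff.mpr hbP
        have hce : 1 ≤ (fr.filter (fun f => f > 0)).count e := List.count_pos_iff.mpr heP
        have hM2 : m + 2 ≤ M := by
          have h1' := hmin a haP; have h2' := hmin b hbP; have h3' := hmin e heP
          have h4' := hle a haP; have h5' := hle b hbP; have h6' := hle e heP
          omega
        have key : ((fr.filter (fun f => f > 0)).count M : Int) + 2 ≤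
            ((fr.filter (fun f => f > 0)).length : Int) := by
          by_cases ha : a = M
          · have := pvCountThree (fr.filter (fun f => f > 0)) M b e
              (by rw [← ha]; exact hab) (by rw [← ha]; exact hae) hbe
            omega
          · by_cases hb : b = M
            · have := pvCountThree (fr.filter (fun f => f > 0)) M a e
                (by rw [← hb]; exact fun h => hab h.symm) (by rw [← hb]; exact hbe) hae
              omega
            · have := pvCountThree (fr.filter (fun f => f > 0)) a b M
                hab (fun h => ha h) (fun h => hb h)
              have hcM := Nat.zero_le ((fr.filter (fun f => f > 0)).count M)
              omega
        simp only [if_neg h1, ne_eq, if_pos h2]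
        show (if c = t then true
          else if c = t - 1 ∧ mn = some 1 then true
          else if c = 1 ∧ Option.map (fun x => x + 1) mn = some M then true
          else false) = false
        rw [hm, hc, ht]
        split_ifs with hc1 hc2 hc3
        · exfalso; omega
        · exfalso; obtain ⟨hc2a, _⟩ := hc2; omega
        · exfalso
          obtain ⟨_, hc3b⟩ := hc3
          rw [Option.map_some] at hc3b
          injection hc3b with h'
          omega
        · rfl

-- ===== VERDICT (by name: the statement is the Claim_ definition above) =====
theorem sameFreq_spec : Claim_equal_sameFreq := by
  intro s _ _
  unfold Spec_sameFreq sameFreq sameFreq_alt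
  exact pvMain (pvFreq s)
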